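-- pv_equiv track=rewrite | github.com/Akunesquik/Puissance4IA | TestsJeu/IA/recompenseAttaquant.py | longueur_chaine_diagonale_droite
-- ===== SOURCE A (Python) =====
-- def longueur_chaine_diagonale_droite(grille, ligne, colonne):
--     pion_joueur = grille[ligne][colonne]
--     longueur = 1  # Initialise la longueur à 1 (comprend le pion actuel)
--
--     # Recherche de l'alignement en diagonale droite (en bas à droite)
--     i, j = ligne + 1, colonne + 1
--     while i < len(grille) and j < len(grille[0]) and grille[i][j] == pion_joueur:
--         longueur += 1
--         i += 1
--         j += 1
--
--     # Recherche de l'alignement en diagonale droite (en haut à gauche)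
--     i, j = ligne - 1, colonne - 1
--     while i >= 0 and j >= 0 and grille[i][j] == pion_joueur:
--         longueur += 1
--         i -= 1
--         j -= 1
--
--     return recompense_longueur(longueur)
--
-- def recompense_longueur(longueur):
--     recompense = 0
--     if longueur == 1:
--         recompense = 0
--     elif longueur == 2:
--         recompense = 3
--     elif longueur == 3:
--         recompense = 7
--     else:
--         recompense = 500
--     return recompense
-- ===== SOURCE B (Python) =====
-- def _run(xs, pion):
--     k = 0
--     for v in xs:
--         if v != pion:
--             break
--         k += 1
--     return k
--
--
-- def longueur_chaine_diagonale_droite(grille, ligne, colonne):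
--     # Gather the whole down-right diagonal through the cell, then scan outward.
--     m = len(grille[0])
--     up = max(0, min(ligne, colonne))          # steps available up-left
--     down = min(len(grille) - ligne, m - colonne) - 1   # steps available down-right
--     vals = [grille[ligne + d][colonne + d] for d in range(-up, down + 1)]
--     pion = vals[up]
--     longueur = 1 + _run(vals[up + 1:], pion) + _run(vals[:up][::-1], pion)
--     return {1: 0, 2: 3, 3: 7}.get(longueur, 500)
-- ===== Notes on version B (the rewrite author's own statement) =====
-- stated objective: alternative
-- what changed: B gathers the whole down-right diagonal through the cell into one list and measures the maximal run around the centre with a single run-scan helper plus a dict lookup for the reward, instead of A's two pointer walks over the grid plus an if-ladder; Pre_ excludes the inputs (jagged grids whose diagonal crosses a too-short row) on which B's gather raises an IndexError while A's walk can stop, on a cell value, before the invalid access.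
-- outside the precondition, e.g. on longueur_chaine_diagonale_droite([[1, 2, 3], [4, 9], [0, 0]], 0, 0): A returns 0, B raises IndexError
import Mathlib
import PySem

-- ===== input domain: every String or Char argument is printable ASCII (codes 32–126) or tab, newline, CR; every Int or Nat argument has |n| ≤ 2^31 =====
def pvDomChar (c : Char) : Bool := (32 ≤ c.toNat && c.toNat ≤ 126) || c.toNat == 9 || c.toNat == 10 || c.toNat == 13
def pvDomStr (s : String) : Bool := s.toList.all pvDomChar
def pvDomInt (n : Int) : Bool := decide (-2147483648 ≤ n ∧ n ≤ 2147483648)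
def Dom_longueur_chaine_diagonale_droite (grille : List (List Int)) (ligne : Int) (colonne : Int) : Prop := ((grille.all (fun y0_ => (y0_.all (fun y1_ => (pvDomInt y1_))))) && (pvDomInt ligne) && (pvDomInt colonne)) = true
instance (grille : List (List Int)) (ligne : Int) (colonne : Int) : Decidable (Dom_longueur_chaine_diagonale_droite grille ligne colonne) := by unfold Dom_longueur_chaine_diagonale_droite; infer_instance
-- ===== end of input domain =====

-- B gathers the whole down-right diagonal into one list and scans outward from the centre
-- (plus a dict lookup for the reward) instead of A's two pointer walks over the grid; same cost.

-- ===== PORT A =====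
-- grid cell grille[i][j]; inside Pre_ both indices are in range, so the defaults are never used
def pvCell (grille : List (List Int)) (i j : Int) : Int :=
  PySem.List.pyGetD (PySem.List.pyGetD grille i []) j 0

-- first while loop of A: state (i, j, longueur); fuel only for totality
def pvDown (grille : List (List Int)) (m pion : Int) : Nat → Int → Int → Int → Int
  | 0, _, _, acc => acc
  | fuel+1, i, j, acc =>
    if i < (grille.length : Int) ∧ j < m ∧ pvCell grille i j = pion then
      pvDown grille m pion fuel (i+1) (j+1) (acc+1)
    else acc

-- second while loop of A
def pvUp (grille : List (List Int)) (pion : Int) : Nat → Int → Int → Int → Int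
  | 0, _, _, acc => acc
  | fuel+1, i, j, acc =>
    if 0 ≤ i ∧ 0 ≤ j ∧ pvCell grille i j = pion then
      pvUp grille pion fuel (i-1) (j-1) (acc+1)
    else acc

def pvRecompense (longueur : Int) : Int :=
  if longueur = 1 then 0
  else if longueur = 2 then 3
  else if longueur = 3 then 7
  else 500

def longueur_chaine_diagonale_droite (grille : List (List Int)) (ligne : Int) (colonne : Int) : Int :=
  let pion := pvCell grille ligne colonne
  let m : Int := ((PySem.List.pyGetD grille 0 []).length : Int)
  let l1 := pvDown grille m pion (grille.length + grille.length) (ligne + 1) (colonne + 1) 1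
  let l2 := pvUp grille pion ligne.toNat (ligne - 1) (colonne - 1) l1
  pvRecompense l2

-- ===== PORT B =====
-- _run of Source B: length of the initial run of elements equal to pion (the loop breaks at the first mismatch)
def pvRun : List Int → Int → Int
  | [], _ => 0
  | v :: t, pion => if v ≠ pion then 0 else 1 + pvRun t pion

def longueur_chaine_diagonale_droite_alt (grille : List (List Int)) (ligne : Int) (colonne : Int) : Int :=
  let m : Int := ((PySem.List.pyGetD grille 0 []).length : Int)
  let up := max 0 (min ligne colonne)
  let down := min ((grille.length : Int) - ligne) (m - colonne) - 1
  let vals := (PySem.List.pyRange (-up) (down + 1) 1).map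
      (fun d => pvCell grille (ligne + d) (colonne + d))
  let pion := PySem.List.pyGetD vals up 0
  -- vals[:up][::-1] ported as take/reverse (PySem.List.slice_to / slice?_none_none_neg_one)
  let longueur := 1 + pvRun (PySem.List.slice vals (some (up + 1)) none) pion
      + pvRun (PySem.List.slice vals none (some up)).reverse pion
  PySem.Dict.getD (PySem.Dict.ofList [(1, 0), (2, 3), (3, 7)]) longueur 500

-- ===== PRECONDITION & SPEC =====
-- Pre_ excludes the inputs on which B's gather of the full diagonal raises an IndexError: it holds
-- exactly when every cell of the diagonal is a valid Python access (and the centre exists); A returns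
-- on all of Pre_ since its walks visit a subset of these cells, while outside Pre_ A either raises
-- too or, on a jagged grid, happens to return because a mismatching cell value stops its walk just
-- before the first invalid access.
def Pre_longueur_chaine_diagonale_droite (grille : List (List Int)) (ligne : Int) (colonne : Int) : Prop :=
  ligne < (grille.length : Int) ∧ colonne < ((grille.headD []).length : Int) ∧
  ∀ d ∈ PySem.List.pyRange (-(max 0 (min ligne colonne)))
      (min ((grille.length : Int) - ligne) (((grille.headD []).length : Int) - colonne)) 1,
    PySem.Raise.InRange grille.length (ligne + d) ∧
    PySem.Raise.InRange (PySem.List.pyGetD grille (ligne + d) []).length (colonne + d)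
instance (grille : List (List Int)) (ligne : Int) (colonne : Int) : Decidable (Pre_longueur_chaine_diagonale_droite grille ligne colonne) := by unfold Pre_longueur_chaine_diagonale_droite; infer_instance

def pvWitness_longueur_chaine_diagonale_droite : List (List Int) × Int × Int := ([[1, 2], [3, 1]], 0, 0)

def Spec_longueur_chaine_diagonale_droite (grille : List (List Int)) (ligne : Int) (colonne : Int) (out : Int) : Prop := out = longueur_chaine_diagonale_droite_alt grille ligne colonne
instance (grille : List (List Int)) (ligne : Int) (colonne : Int) (out : Int) : Decidable (Spec_longueur_chaine_diagonale_droite grille ligne colonne out) := by unfold Spec_longueur_chaine_diagonale_droite; infer_instance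

-- ===== CLAIM (what is proved, stated in full; the proofs are below) =====
def Claim_equal_longueur_chaine_diagonale_droite : Prop := ∀ (grille : List (List Int)) (ligne : Int) (colonne : Int), Dom_longueur_chaine_diagonale_droite grille ligne colonne → Pre_longueur_chaine_diagonale_droite grille ligne colonne → Spec_longueur_chaine_diagonale_droite grille ligne colonne (longueur_chaine_diagonale_droite grille ligne colonne)

-- ===== LEMMAS AND PROOFS =====

-- A's reward ladder agrees with B's dict lookup on every integer
lemma dict_lit : (PySem.Dict.ofList [((1:Int), (0:Int)), (2, 3), (3, 7)]) = PySem.Dict.mk [(1, 0), (2, 3), (3, 7)] := by decide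

lemma recompense_eq_dict (l : Int) :
    pvRecompense l = PySem.Dict.getD (PySem.Dict.ofList [(1, 0), (2, 3), (3, 7)]) l 500 := by
  unfold pvRecompense
  rw [dict_lit, PySem.Dict.getD_eq_get?_getD]
  by_cases h1 : l = 1
  · subst h1; decide
  by_cases h2 : l = 2
  · subst h2; decide
  by_cases h3 : l = 3
  · subst h3; decide
  have b1 : ((1:Int) == l) = false := by rw [beq_eq_false_iff_ne]; omega
  have b2 : ((2:Int) == l) = false := by rw [beq_eq_false_iff_ne]; omega
  have b3 : ((3:Int) == l) = false := by rw [beq_eq_false_iff_ne]; omega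
  simp [PySem.Dict.get?, List.find?, b1, b2, b3, h1, h2, h3]

-- A's downward walk = run scan over the gathered tail of the diagonal
lemma pvDown_eq_run (grille : List (List Int)) (m pion ligne colonne D : Int)
    (hD : D = min ((grille.length : Int) - ligne) (m - colonne) - 1) :
    ∀ (fuel : Nat) (t : Int), (D + 1 - t).toNat ≤ fuel → ∀ acc : Int,
      pvDown grille m pion fuel (ligne + t) (colonne + t) acc
        = acc + pvRun ((PySem.List.pyRange t (D + 1) 1).map
            (fun d => pvCell grille (ligne + d) (colonne + d))) pion := by
  intro fuel
  induction fuel with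
  | zero =>
    intro t ht acc
    have hte : D + 1 ≤ t := by omega
    rw [PySem.List.pyRange_one_eq_nil hte]
    simp [pvDown, pvRun]
  | succ fuel ih =>
    intro t ht acc
    by_cases htD : t ≤ D
    · rw [PySem.List.pyRange_one_cons (by omega : t < D + 1)]
      have hb : ligne + t < (grille.length : Int) ∧ colonne + t < m := by
        constructor <;> omega
      by_cases hp : pvCell grille (ligne + t) (colonne + t) = pion
      · simp only [pvDown, if_pos (And.intro hb.1 (And.intro hb.2 hp))]
        rw [show ligne + t + 1 = ligne + (t + 1) by ring,
            show colonne + t + 1 = colonne + (t + 1) by ring,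
            ih (t + 1) (by omega) (acc + 1), List.map_cons, hp]
        simp only [pvRun, ne_eq, not_true_eq_false, if_false]
        ring
      · simp only [pvDown]
        rw [if_neg (by tauto), List.map_cons]
        simp [pvRun, hp]
    · have hte : D + 1 ≤ t := by omega
      rw [PySem.List.pyRange_one_eq_nil hte]
      have hb : ¬(ligne + t < (grille.length : Int) ∧ colonne + t < m ∧
          pvCell grille (ligne + t) (colonne + t) = pion) := by
        intro h; omega
      simp only [pvDown, pvRun, if_neg hb, List.map_nil]
      simp

-- A's upward walk = run scan over the reversed gathered head of the diagonal
lemma pvUp_eq_run (grille : List (List Int)) (pion ligne colonne U : Int)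
    (hU : U = min ligne colonne) :
    ∀ (fuel : Nat) (t : Int), (U + 1 - t).toNat ≤ fuel → 1 ≤ t → ∀ acc : Int,
      pvUp grille pion fuel (ligne - t) (colonne - t) acc
        = acc + pvRun ((PySem.List.pyRange t (U + 1) 1).map
            (fun d => pvCell grille (ligne - d) (colonne - d))) pion := by
  intro fuel
  induction fuel with
  | zero =>
    intro t ht _ acc
    have hte : U + 1 ≤ t := by omega
    rw [PySem.List.pyRange_one_eq_nil hte]
    simp [pvUp, pvRun]
  | succ fuel ih =>
    intro t ht ht1 acc
    by_cases htU : t ≤ U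
    · rw [PySem.List.pyRange_one_cons (by omega : t < U + 1)]
      have hb : 0 ≤ ligne - t ∧ 0 ≤ colonne - t := by constructor <;> omega
      by_cases hp : pvCell grille (ligne - t) (colonne - t) = pion
      · simp only [pvUp, if_pos (And.intro hb.1 (And.intro hb.2 hp))]
        rw [show ligne - t - 1 = ligne - (t + 1) by ring,
            show colonne - t - 1 = colonne - (t + 1) by ring,
            ih (t + 1) (by omega) (by omega) (acc + 1), List.map_cons, hp]
        simp only [pvRun, ne_eq, not_true_eq_false, if_false]
        ring
      · simp only [pvUp]
        rw [if_neg (by tauto), List.map_cons]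
        simp [pvRun, hp]
    · have hte : U + 1 ≤ t := by omega
      rw [PySem.List.pyRange_one_eq_nil hte]
      have hb : ¬(0 ≤ ligne - t ∧ 0 ≤ colonne - t ∧
          pvCell grille (ligne - t) (colonne - t) = pion) := by
        intro h; omega
      simp only [pvUp, pvRun, if_neg hb, List.map_nil]
      simp

-- ===== VERDICT (by name: the statement is the Claim_ definition above) =====
theorem longueur_chaine_diagonale_droite_spec : Claim_equal_longueur_chaine_diagonale_droite := by
  intro grille ligne colonne _ hpre
  unfold Spec_longueur_chaine_diagonale_droite
  match grille, hpre with
  | [], hpre => exfalso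
                obtain ⟨h1, h2, hall⟩ := hpre
                simp at h1 h2
                have h0 := hall 0 (by rw [PySem.List.mem_pyRange_one]; constructor <;> omega)
                unfold PySem.Raise.InRange at h0
                simp only [List.length_nil] at h0
                omega
  | r0 :: rest, hpre =>
  obtain ⟨hln, hcm, hall⟩ := hpre
  simp only [longueur_chaine_diagonale_droite, longueur_chaine_diagonale_droite_alt,
    PySem.List.pyGetD_zero_cons]
  rw [List.headD_cons] at hcm
  have hmem : (0 : Int) ∈ PySem.List.pyRange (-(max 0 (min ligne colonne)))
      (min (((r0 :: rest).length : Int) - ligne)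
        ((((r0 :: rest).headD []).length : Int) - colonne)) 1 := by
    rw [PySem.List.mem_pyRange_one, List.headD_cons]
    constructor <;> omega
  have h0 := hall 0 hmem
  have hlg : -((r0 :: rest).length : Int) ≤ ligne := by
    unfold PySem.Raise.InRange at h0
    omega
  set g : List (List Int) := r0 :: rest with hg
  set n : Int := (g.length : Int) with hn
  set m : Int := (r0.length : Int) with hm
  set U : Int := min ligne colonne with hU
  set up : Int := max 0 U with hup
  set down : Int := min (n - ligne) (m - colonne) - 1 with hdown
  have hup0 : 0 ≤ up := by omega
  have hdown0 : 0 ≤ down := by omega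
  set f : Int → Int := fun d => pvCell g (ligne + d) (colonne + d) with hf
  -- the gathered diagonal splits as P ++ f 0 :: Q around the centre
  have hsplit : PySem.List.pyRange (-up) (down + 1) 1
      = PySem.List.pyRange (-up) 0 1 ++ (0 :: PySem.List.pyRange 1 (down + 1) 1) := by
    rw [PySem.List.pyRange_one_append (-up) 0 (down + 1) (by omega) (by omega),
        PySem.List.pyRange_one_cons (by omega : (0:Int) < down + 1)]
    norm_num
  set P : List Int := (PySem.List.pyRange (-up) 0 1).map f with hP
  set Q : List Int := (PySem.List.pyRange 1 (down + 1) 1).map f with hQ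
  have hvals : (PySem.List.pyRange (-up) (down + 1) 1).map f = P ++ f 0 :: Q := by
    rw [hsplit]; simp [hP, hQ]
  have hPlen : (P.length : Int) = up := by
    simp [hP, PySem.List.length_pyRange_one]; omega
  -- the centre element of the gathered list is the cell itself
  have hpion : PySem.List.pyGetD ((PySem.List.pyRange (-up) (down + 1) 1).map f) up 0 = f 0 := by
    rw [hvals, ← hPlen, PySem.List.pyGetD_natCast]
    simp [List.getD]
  -- the tail slice is Q
  have hafter : PySem.List.slice ((PySem.List.pyRange (-up) (down + 1) 1).map f)
      (some (up + 1)) none = Q := by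
    rw [hvals, PySem.List.slice_from _ (by omega : (0:Int) ≤ up + 1)]
    have h1 : (up + 1).toNat = P.length + 1 := by omega
    rw [h1, show P ++ f 0 :: Q = (P ++ [f 0]) ++ Q by simp,
        show P.length + 1 = (P ++ [f 0]).length by simp, List.drop_left]
  -- the head slice is P
  have hbefore : PySem.List.slice ((PySem.List.pyRange (-up) (down + 1) 1).map f)
      none (some up) = P := by
    rw [hvals, PySem.List.slice_to _ hup0]
    have h1 : up.toNat = P.length := by omega
    rw [h1, show P ++ f 0 :: Q = P ++ (f 0 :: Q) by rfl, List.take_left]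
  -- reversed head = the up-left cells in walk order
  have hrev : P.reverse = (PySem.List.pyRange 1 (up + 1) 1).map
      (fun d => pvCell g (ligne - d) (colonne - d)) := by
    rw [hP, ← List.map_reverse]
    have h2 : (PySem.List.pyRange (-up) 0 1).reverse = PySem.List.pyRange (-1) (-up - 1) (-1) := by
      rw [PySem.List.pyRange_neg_one_eq_reverse]
      norm_num
    rw [h2, PySem.List.pyRange_neg_one, PySem.List.pyRange_one]
    simp only [List.map_map]
    have h3 : (-1 - (-up - 1)).toNat = (up + 1 - 1).toNat := by omega
    rw [h3]
    apply List.map_congr_left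
    intro k _
    show f (-1 - (k : Int)) = pvCell g (ligne - (1 + (k : Int))) (colonne - (1 + (k : Int)))
    rw [hf]
    congr 1 <;> ring
  -- A's two walks, characterised by the run scans
  have hdownw : pvDown g m (f 0) (g.length + g.length) (ligne + 1) (colonne + 1) 1
      = 1 + pvRun Q (f 0) := by
    rw [show (1 : Int) + pvRun Q (f 0) = 1 + pvRun ((PySem.List.pyRange 1 (down + 1) 1).map f) (f 0) by rw [hQ]]
    exact pvDown_eq_run g m (f 0) ligne colonne down hdown (g.length + g.length) 1 (by omega) 1
  have hUr : PySem.List.pyRange 1 (up + 1) 1 = PySem.List.pyRange 1 (U + 1) 1 := by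
    by_cases hU0 : 0 ≤ U
    · rw [show up = U by omega]
    · rw [PySem.List.pyRange_one_eq_nil (by omega), PySem.List.pyRange_one_eq_nil (by omega)]
  have hupw : ∀ acc : Int, pvUp g (f 0) ligne.toNat (ligne - 1) (colonne - 1) acc
      = acc + pvRun P.reverse (f 0) := by
    intro acc
    rw [hrev, hUr]
    exact pvUp_eq_run g (f 0) ligne colonne U hU ligne.toNat 1 (by omega) (by omega) acc
  have hf0 : pvCell g ligne colonne = f 0 := by rw [hf]; norm_num
  rw [hf0, hpion, hafter, hbefore, hdownw, hupw, recompense_eq_dict]
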